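-- pv_equiv track=rewrite | github.com/JoshHumpherey/EPIJudge | epi_judge_python_solutions/sort_increasing_decreasing_array.py | sort_k_increasing_decreasing_array
-- ===== SOURCE A (Python) =====
-- import heapq
--
-- def sort_k_increasing_decreasing_array(A):
--     min_heap = []
--     for element in A:
--         heapq.heappush(min_heap, element)
--     final = []
--     while min_heap:
--         final.append(heapq.heappop(min_heap))
--     return final
-- ===== SOURCE B (Python) =====
-- def sort_k_increasing_decreasing_array(A):
--     return sorted(A)
-- ===== Notes on version B (the rewrite author's own statement) =====
-- stated objective: idiomatic
-- what changed: Replaces the element-by-element heappush loop and heappop drain with a single call to the built-in sorted(), since the function simply heap-sorts the whole list.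
import Mathlib
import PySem

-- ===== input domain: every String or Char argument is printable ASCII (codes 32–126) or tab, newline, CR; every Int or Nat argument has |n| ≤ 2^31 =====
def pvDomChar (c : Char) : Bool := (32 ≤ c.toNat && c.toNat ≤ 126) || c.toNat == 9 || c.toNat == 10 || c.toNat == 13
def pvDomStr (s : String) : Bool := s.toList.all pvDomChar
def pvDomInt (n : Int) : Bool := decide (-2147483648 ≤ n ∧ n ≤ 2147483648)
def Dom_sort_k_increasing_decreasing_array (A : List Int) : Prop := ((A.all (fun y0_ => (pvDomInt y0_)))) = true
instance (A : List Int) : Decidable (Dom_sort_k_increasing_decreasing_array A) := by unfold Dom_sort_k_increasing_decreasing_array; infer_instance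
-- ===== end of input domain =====

-- B replaces A's heap push/pop loop with the idiomatic built-in sorted(A); same result, same asymptotic cost.


-- ===== PORT A =====
-- heapq is not covered by PySem, so it is ported by hand as a priority-queue model:
-- heappush adds the element, heappop removes and returns a minimal element.  This is
-- exact for A's use: A never inspects the heap's internal list layout, only the popped
-- values, and on Int the sequence of popped values of a min-heap is determined by the
-- multiset of pushed elements (ties are between equal integers, hence indistinguishable).

-- heapq.heappush(min_heap, element)
def pvHeappush (h : List Int) (x : Int) : List Int := h ++ [x]

-- heapq.heappop(min_heap): returns (minimum, remaining heap); none on the empty heap (A never pops empty)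
def pvHeappop : List Int → Option (Int × List Int)
  | [] => none
  | x :: t =>
    match pvHeappop t with
    | none => some (x, [])
    | some (m, r) => if x ≤ m then some (x, t) else some (m, x :: r)

-- needed by pvDrain's decreasing_by (hence above the claim block)
theorem pvHeappop_cons_ne_none (t : List Int) (x : Int) : pvHeappop (x :: t) ≠ none := by
  simp only [pvHeappop]
  cases pvHeappop t with
  | none => simp
  | some p => obtain ⟨m, r⟩ := p; by_cases hx : x ≤ m <;> simp [hx]

-- needed by pvDrain's decreasing_by (hence above the claim block)
theorem pvHeappop_length : ∀ (h : List Int) (m : Int) (r : List Int),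
    pvHeappop h = some (m, r) → r.length + 1 = h.length := by
  intro h
  induction h with
  | nil => intro m r hp; simp [pvHeappop] at hp
  | cons x t ih =>
    intro m r hp
    simp only [pvHeappop] at hp
    cases ht : pvHeappop t with
    | none =>
      rw [ht] at hp
      have ht0 : t = [] := by
        cases t with
        | nil => rfl
        | cons y u => exact absurd ht (pvHeappop_cons_ne_none u y)
      subst ht0
      simp only [Option.some.injEq, Prod.mk.injEq] at hp
      obtain ⟨h1, h2⟩ := hp
      subst h2; simp
    | some p =>
      rw [ht] at hp
      obtain ⟨m', r'⟩ := p
      have := ih m' r' ht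
      simp only at hp
      split at hp <;> simp only [Option.some.injEq, Prod.mk.injEq] at hp <;>
        obtain ⟨h1, h2⟩ := hp <;> subst h2 <;> simp_all

-- while min_heap: final.append(heapq.heappop(min_heap))
def pvDrain (h : List Int) : List Int :=
  match hp : pvHeappop h with
  | none => []
  | some (m, r) => m :: pvDrain r
termination_by h.length
decreasing_by
  have := pvHeappop_length h m r hp
  omega

def sort_k_increasing_decreasing_array (A : List Int) : List Int :=
  let min_heap := A.foldl pvHeappush []
  pvDrain min_heap

-- ===== PORT B =====
-- return sorted(A)
def sort_k_increasing_decreasing_array_alt (A : List Int) : List Int :=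
  PySem.List.sorted A (fun x => x) false

-- ===== PRECONDITION & SPEC =====
def Spec_sort_k_increasing_decreasing_array (A : List Int) (out : List Int) : Prop := out = sort_k_increasing_decreasing_array_alt A
instance (A : List Int) (out : List Int) : Decidable (Spec_sort_k_increasing_decreasing_array A out) := by unfold Spec_sort_k_increasing_decreasing_array; infer_instance

-- ===== CLAIM (what is proved, stated in full; the proofs are below) =====
def Claim_equal_sort_k_increasing_decreasing_array : Prop := ∀ (A : List Int), Dom_sort_k_increasing_decreasing_array A → Spec_sort_k_increasing_decreasing_array A (sort_k_increasing_decreasing_array A)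

-- ===== LEMMAS AND PROOFS =====

theorem pvHeappop_perm : ∀ (h : List Int) (m : Int) (r : List Int),
    pvHeappop h = some (m, r) → (m :: r).Perm h := by
  intro h
  induction h with
  | nil => intro m r hp; simp [pvHeappop] at hp
  | cons x t ih =>
    intro m r hp
    simp only [pvHeappop] at hp
    cases ht : pvHeappop t with
    | none =>
      rw [ht] at hp
      have ht0 : t = [] := by
        cases t with
        | nil => rfl
        | cons y u => exact absurd ht (pvHeappop_cons_ne_none u y)
      subst ht0
      simp only [Option.some.injEq, Prod.mk.injEq] at hp
      obtain ⟨h1, h2⟩ := hp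
      subst h1; subst h2
      exact List.Perm.refl _
    | some p =>
      rw [ht] at hp
      obtain ⟨m', r'⟩ := p
      have hperm := ih m' r' ht
      simp only at hp
      split at hp <;> simp only [Option.some.injEq, Prod.mk.injEq] at hp <;>
        obtain ⟨h1, h2⟩ := hp <;> subst h1 <;> subst h2
      · exact List.Perm.refl _
      · exact (List.Perm.swap x m' r').trans (List.Perm.cons x hperm)

theorem pvHeappop_min : ∀ (h : List Int) (m : Int) (r : List Int),
    pvHeappop h = some (m, r) → ∀ y ∈ h, m ≤ y := by
  intro h
  induction h with
  | nil => intro m r hp; simp [pvHeappop] at hp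
  | cons x t ih =>
    intro m r hp y hy
    simp only [pvHeappop] at hp
    cases ht : pvHeappop t with
    | none =>
      rw [ht] at hp
      have ht0 : t = [] := by
        cases t with
        | nil => rfl
        | cons a u => exact absurd ht (pvHeappop_cons_ne_none u a)
      subst ht0
      simp only [Option.some.injEq, Prod.mk.injEq] at hp
      obtain ⟨h1, _⟩ := hp
      simp at hy
      omega
    | some p =>
      rw [ht] at hp
      obtain ⟨m', r'⟩ := p
      have hmin := ih m' r' ht
      simp only at hp
      split at hp <;> rename_i hx <;> simp only [Option.some.injEq, Prod.mk.injEq] at hp <;>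
        obtain ⟨h1, _⟩ := hp <;> subst h1
      · rcases List.mem_cons.mp hy with h | h
        · omega
        · have := hmin y h; omega
      · rcases List.mem_cons.mp hy with h | h
        · subst h; omega
        · exact hmin y h

theorem pvDrain_eq_none (h : List Int) (hp : pvHeappop h = none) : pvDrain h = [] := by
  rw [pvDrain]
  split <;> simp_all

theorem pvDrain_eq_some (h : List Int) (m : Int) (r : List Int)
    (hp : pvHeappop h = some (m, r)) : pvDrain h = m :: pvDrain r := by
  rw [pvDrain]
  split <;> simp_all

-- the drain loop returns the elements of the heap in nondecreasing order
theorem pvDrain_spec : ∀ (n : Nat) (h : List Int), h.length ≤ n →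
    (pvDrain h).Perm h ∧ (pvDrain h).Pairwise (· ≤ ·) := by
  intro n
  induction n with
  | zero =>
    intro h hl
    have : h = [] := List.length_eq_zero_iff.mp (Nat.le_zero.mp hl)
    subst this
    rw [pvDrain_eq_none [] rfl]
    exact ⟨List.Perm.refl _, List.Pairwise.nil⟩
  | succ n ih =>
    intro h hl
    cases hp : pvHeappop h with
    | none =>
      rw [pvDrain_eq_none h hp]
      cases h with
      | nil => exact ⟨List.Perm.refl _, List.Pairwise.nil⟩
      | cons x t => exact absurd hp (pvHeappop_cons_ne_none t x)
    | some p =>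
      obtain ⟨m, r⟩ := p
      have hlen := pvHeappop_length h m r hp
      obtain ⟨ihperm, ihpw⟩ := ih r (by omega)
      rw [pvDrain_eq_some h m r hp]
      constructor
      · exact (List.Perm.cons m ihperm).trans (pvHeappop_perm h m r hp)
      · refine List.pairwise_cons.mpr ⟨?_, ihpw⟩
        intro y hy
        have hyr : y ∈ r := (ihperm.mem_iff).mp hy
        have hyh : y ∈ h := ((pvHeappop_perm h m r hp).mem_iff).mp (List.mem_cons_of_mem m hyr)
        exact pvHeappop_min h m r hp y hyh

theorem pvFoldl_push (A acc : List Int) : A.foldl pvHeappush acc = acc ++ A := by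
  induction A generalizing acc with
  | nil => simp
  | cons x t ih => simp [List.foldl, pvHeappush, ih]

-- ===== VERDICT (by name: the statement is the Claim_ definition above) =====
theorem sort_k_increasing_decreasing_array_spec : Claim_equal_sort_k_increasing_decreasing_array := by
  intro A _
  unfold Spec_sort_k_increasing_decreasing_array
  unfold sort_k_increasing_decreasing_array sort_k_increasing_decreasing_array_alt
  have hfold : A.foldl pvHeappush [] = A := by simpa using pvFoldl_push A []
  simp only [hfold]
  obtain ⟨hperm, hpw⟩ := pvDrain_spec A.length A (le_refl _)
  exact (PySem.List.sorted_id_eq_of_perm_of_pairwise A (pvDrain A) hperm hpw).symm
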